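-- pv_equiv track=rewrite | github.com/hvsouza/AoC2024 | 07/7.py | try_options_complex
-- ===== SOURCE A (Python) =====
-- def try_options_complex(theoperation, values, vref):
--     res = values[0]
--     for dtype, v in zip(theoperation, values[1:]):
--         if dtype==1:
--             res*=v
--         elif dtype==0:
--             res+=v
--         else:
--             tmpres = str(res)
--             tmpv = str(v)
--             res=int(tmpres+tmpv)
--     if res == vref:
--         return True
--     return False
-- ===== SOURCE B (Python) =====
-- def try_options_complex(theoperation, values, vref):
--     def make_step(dtype, v):
--         if dtype == 1:
--             return lambda r: r * v
--         if dtype == 0: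
--             return lambda r: r + v
--         return lambda r: int(str(r) + str(v))
--
--     pipeline = lambda r: r
--     for dtype, v in reversed(list(zip(theoperation, values[1:]))):
--         pipeline = (lambda f, g: lambda r: g(f(r)))(make_step(dtype, v), pipeline)
--     return pipeline(values[0]) == vref
-- ===== Notes on version B (the rewrite author's own statement) =====
-- stated objective: alternative
-- what changed: B replaces A's mutating accumulator loop by building a pipeline of per-step closures (one unary function per (dtype, value) pair), composed back-to-front over the reversed pair stream, and then applying the composed function once to values[0] before comparing with vref.
import Mathlib
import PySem

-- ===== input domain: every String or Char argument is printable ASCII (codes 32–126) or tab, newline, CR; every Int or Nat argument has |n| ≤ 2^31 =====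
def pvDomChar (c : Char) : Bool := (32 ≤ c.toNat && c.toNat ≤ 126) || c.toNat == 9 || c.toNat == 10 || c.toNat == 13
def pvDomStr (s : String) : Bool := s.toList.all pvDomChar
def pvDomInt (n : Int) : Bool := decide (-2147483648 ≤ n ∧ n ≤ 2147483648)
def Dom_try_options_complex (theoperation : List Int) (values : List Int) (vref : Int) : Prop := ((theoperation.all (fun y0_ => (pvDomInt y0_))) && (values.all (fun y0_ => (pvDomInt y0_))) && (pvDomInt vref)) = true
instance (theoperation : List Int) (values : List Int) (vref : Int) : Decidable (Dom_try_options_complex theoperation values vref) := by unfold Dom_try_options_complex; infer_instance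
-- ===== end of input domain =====

-- B rebuilds the computation as a pipeline of per-step closures composed back-to-front and applied once;
-- same return value as A's mutating loop (objective: alternative decomposition, no speed claim).

-- ===== PORT A =====
-- A's loop carries res through each (dtype, v) pair; an exception (int() ValueError) is modelled
-- as an Option state: 'none' is exactly where Python raises (excluded by Pre_).
-- int(str(res)+str(v)) is ported exactly as PySem.Int.ofChars? (toChars res ++ toChars v)
-- (= ofStr? of the concatenated strings, by PySem.Int.ofStr?.eq_1 / toList_toStr).
def try_options_complex (theoperation : List Int) (values : List Int) (vref : Int) : Bool :=
  match PySem.List.pyGet? values 0 with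
  | none => false  -- values[0] IndexError: outside Pre_
  | some r0 =>
    match (theoperation.zip (PySem.List.slice values (some 1) none)).foldl
        (fun (acc : Option Int) (p : Int × Int) =>
          acc.bind (fun res =>
            if p.1 = 1 then some (res * p.2)
            else if p.1 = 0 then some (res + p.2)
            else PySem.Int.ofChars? (PySem.Int.toChars res ++ PySem.Int.toChars p.2)))
        (some r0) with
    | none => false  -- int() ValueError: outside Pre_
    | some res => if res = vref then true else false

-- ===== PORT B =====
-- make_step(dtype, v): the one-step closure; Int → Option Int, 'none' where Python's int() raises.
def tocMakeStep (dtype v : Int) : Int → Option Int :=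
  if dtype = 1 then fun r => some (r * v)
  else if dtype = 0 then fun r => some (r + v)
  else fun r => PySem.Int.ofChars? (PySem.Int.toChars r ++ PySem.Int.toChars v)

def try_options_complex_alt (theoperation : List Int) (values : List Int) (vref : Int) : Bool :=
  let pipeline :=
    (theoperation.zip (PySem.List.slice values (some 1) none)).reverse.foldl
      (fun (g : Int → Option Int) (p : Int × Int) => fun r => (tocMakeStep p.1 p.2 r).bind g)
      (fun r => some r)
  match PySem.List.pyGet? values 0 with
  | none => false  -- values[0] IndexError: outside Pre_
  | some r0 =>
    match pipeline r0 with
    | none => false  -- int() ValueError inside the pipeline: outside Pre_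
    | some res => decide (res = vref)

-- ===== PRECONDITION & SPEC =====
-- Pre_ excludes exactly the inputs where Python A raises: empty values (IndexError on values[0])
-- and any concatenation step (dtype not 0 or 1) whose right operand is negative, where
-- int(str(res)+str(v)) raises ValueError; B raises identically there.
def Pre_try_options_complex (theoperation : List Int) (values : List Int) (vref : Int) : Prop :=
  values ≠ [] ∧ ∀ p ∈ theoperation.zip (values.drop 1), p.1 ≠ 0 → p.1 ≠ 1 → 0 ≤ p.2
instance (theoperation : List Int) (values : List Int) (vref : Int) : Decidable (Pre_try_options_complex theoperation values vref) := by unfold Pre_try_options_complex; infer_instance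

def pvWitness_try_options_complex : List Int × List Int × Int := ([1, 0, 2], [2, 3, 4, 5], 105)

def Spec_try_options_complex (theoperation : List Int) (values : List Int) (vref : Int) (out : Bool) : Prop := out = try_options_complex_alt theoperation values vref
instance (theoperation : List Int) (values : List Int) (vref : Int) (out : Bool) : Decidable (Spec_try_options_complex theoperation values vref out) := by unfold Spec_try_options_complex; infer_instance

-- ===== CLAIM (what is proved, stated in full; the proofs are below) =====
def Claim_equal_try_options_complex : Prop := ∀ (theoperation : List Int) (values : List Int) (vref : Int), Dom_try_options_complex theoperation values vref → Pre_try_options_complex theoperation values vref → Spec_try_options_complex theoperation values vref (try_options_complex theoperation values vref)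

-- ===== LEMMAS AND PROOFS =====

-- tocMakeStep applied to r is A's branch-on-dtype expression.
theorem tocMakeStep_apply (dtype v r : Int) :
    tocMakeStep dtype v r =
      (if dtype = 1 then some (r * v)
       else if dtype = 0 then some (r + v)
       else PySem.Int.ofChars? (PySem.Int.toChars r ++ PySem.Int.toChars v)) := by
  unfold tocMakeStep; split_ifs <;> rfl

-- Binding an Option state through the composed pipeline equals A's state-carrying foldl.
theorem toc_pipeline_eq_foldl (l : List (Int × Int)) (o : Option Int) :
    o.bind (l.foldr (fun p g r => (tocMakeStep p.1 p.2 r).bind g) (fun r => some r)) =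
      l.foldl
        (fun (acc : Option Int) (p : Int × Int) =>
          acc.bind (fun res =>
            if p.1 = 1 then some (res * p.2)
            else if p.1 = 0 then some (res + p.2)
            else PySem.Int.ofChars? (PySem.Int.toChars res ++ PySem.Int.toChars p.2)))
        o := by
  induction l generalizing o with
  | nil => cases o <;> rfl
  | cons p t ih =>
    simp only [List.foldr_cons, List.foldl_cons]
    rw [← ih]
    cases o with
    | none => rfl
    | some r => simp [tocMakeStep_apply]

-- ===== VERDICT (by name: the statement is the Claim_ definition above) =====
theorem try_options_complex_spec : Claim_equal_try_options_complex := by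
  intro theoperation values vref _hDom _hPre
  unfold Spec_try_options_complex try_options_complex try_options_complex_alt
  cases hv : PySem.List.pyGet? values 0 with
  | none => rfl
  | some r0 =>
    simp only [List.foldl_reverse]
    rw [← toc_pipeline_eq_foldl (theoperation.zip (PySem.List.slice values (some 1) none)) (some r0)]
    simp only [Option.bind_some]
    cases h : (theoperation.zip (PySem.List.slice values (some 1) none)).foldr
        (fun p g r => (tocMakeStep p.1 p.2 r).bind g) (fun r => some r) r0 with
    | none => rfl
    | some res => split <;> simp_all
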